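-- pv_equiv track=rewrite | github.com/ngocson2vn/learnpython | algorithms/103-algorithms/dynamic-programming/find-ways-to-score.py | find_ways_dp
-- ===== SOURCE A (Python) =====
-- def find_ways_dp(N):
--   if N < 3:
--     return 0
--
--   ways = [0] * (N + 1)
--   ways[0] = 1
--   ways[1] = 0
--   ways[2] = 0
--
--   for n in range(3, N + 1):
--     if n - 3 >= 0:
--       ways[n] += ways[n - 3]
--     if n - 5 >= 0:
--       ways[n] += ways[n - 5]
--     if n - 10 >= 0:
--       ways[n] += ways[n - 10]
--
--   return ways[N]
-- ===== SOURCE B (Python) =====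
-- def find_ways_dp(N):
--   # exponentiation by squaring of the order-10 companion matrix of the
--   # recurrence ways[n] = ways[n-3] + ways[n-5] + ways[n-10]
--   if N < 3:
--     return 0
--   # companion matrix: rows 0..8 shift the window, row 9 applies the recurrence
--   M = [[0, 1, 0, 0, 0, 0, 0, 0, 0, 0],
--        [0, 0, 1, 0, 0, 0, 0, 0, 0, 0],
--        [0, 0, 0, 1, 0, 0, 0, 0, 0, 0],
--        [0, 0, 0, 0, 1, 0, 0, 0, 0, 0],
--        [0, 0, 0, 0, 0, 1, 0, 0, 0, 0],
--        [0, 0, 0, 0, 0, 0, 1, 0, 0, 0],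
--        [0, 0, 0, 0, 0, 0, 0, 1, 0, 0],
--        [0, 0, 0, 0, 0, 0, 0, 0, 1, 0],
--        [0, 0, 0, 0, 0, 0, 0, 0, 0, 1],
--        [1, 0, 0, 0, 0, 1, 0, 1, 0, 0]]
--   P = [[1, 0, 0, 0, 0, 0, 0, 0, 0, 0],
--        [0, 1, 0, 0, 0, 0, 0, 0, 0, 0],
--        [0, 0, 1, 0, 0, 0, 0, 0, 0, 0],
--        [0, 0, 0, 1, 0, 0, 0, 0, 0, 0],
--        [0, 0, 0, 0, 1, 0, 0, 0, 0, 0],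
--        [0, 0, 0, 0, 0, 1, 0, 0, 0, 0],
--        [0, 0, 0, 0, 0, 0, 1, 0, 0, 0],
--        [0, 0, 0, 0, 0, 0, 0, 1, 0, 0],
--        [0, 0, 0, 0, 0, 0, 0, 0, 1, 0],
--        [0, 0, 0, 0, 0, 0, 0, 0, 0, 1]]
--   e = N - 2
--   while e > 0:
--     if e % 2 == 1:
--       P = _mat_mul(P, M)
--     M = _mat_mul(M, M)
--     e //= 2
--   # the initial window (ways[-7..2]) is the unit vector with 1 at index 7
--   # (ways[0] = 1), so ways[N] is entry [9][7] of the companion matrix to the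
--   # power N - 2
--   return P[9][7]
--
-- def _mat_mul(A, B):
--   return [[sum(A[i][k] * B[k][j] for k in range(10)) for j in range(10)] for i in range(10)]
-- ===== Notes on version B (the rewrite author's own statement) =====
-- stated objective: alternative
-- what changed: Replaces the linear DP table over 0..N by exponentiation-by-squaring of the order-10 companion matrix of the recurrence, reading the answer off entry [9][7] of M^(N-2).
import Mathlib
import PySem

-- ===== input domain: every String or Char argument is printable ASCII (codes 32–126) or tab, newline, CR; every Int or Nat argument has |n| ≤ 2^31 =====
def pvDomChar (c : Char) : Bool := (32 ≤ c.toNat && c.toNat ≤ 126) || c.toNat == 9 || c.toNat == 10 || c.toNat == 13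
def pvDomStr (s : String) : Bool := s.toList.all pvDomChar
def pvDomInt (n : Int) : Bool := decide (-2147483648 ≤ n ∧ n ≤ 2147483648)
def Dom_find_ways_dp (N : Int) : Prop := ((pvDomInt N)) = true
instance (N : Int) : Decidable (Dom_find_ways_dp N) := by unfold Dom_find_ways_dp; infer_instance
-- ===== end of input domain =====

-- B replaces A's length-(N+1) DP table by an alternative algorithm: exponentiation by
-- squaring of the order-10 companion matrix of the recurrence, reading off one entry.

-- ===== PORT A =====
-- Python's list here is a mutable array, so `ways` is an `Array Int`.
-- loop body of A's `for n in range(3, N+1)`.  Every index used here (n, and n-3 / n-5 /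
-- n-10 under their guards) is provably nonnegative and < len(ways), so `.toNat` with
-- `getD`/`setIfInBounds` is exact (Python raises only out of range, which never happens).
def aStep (ways : Array Int) (n : Int) : Array Int :=
  let w1 := if n - 3 ≥ 0 then ways.setIfInBounds n.toNat (ways.getD n.toNat 0 + ways.getD (n - 3).toNat 0) else ways
  let w2 := if n - 5 ≥ 0 then w1.setIfInBounds n.toNat (w1.getD n.toNat 0 + w1.getD (n - 5).toNat 0) else w1
  let w3 := if n - 10 ≥ 0 then w2.setIfInBounds n.toNat (w2.getD n.toNat 0 + w2.getD (n - 10).toNat 0) else w2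
  w3

def find_ways_dp (N : Int) : Int :=
  if N < 3 then 0
  else
    let ways := Array.replicate (N + 1).toNat 0
    let ways := ways.setIfInBounds 0 1
    let ways := ways.setIfInBounds 1 0
    let ways := ways.setIfInBounds 2 0
    let ways := (PySem.List.pyRange 3 (N + 1) 1).foldl aStep ways
    ways.getD N.toNat 0

-- ===== PORT B =====
-- matrix entry A[i][j] (all accesses in Source B are in range, so `getD` is exact)
def matGet (A : List (List Int)) (i j : Nat) : Int := (A.getD i []).getD j 0

-- _mat_mul of Source B
def matMul (A B : List (List Int)) : List (List Int) :=
  (List.range 10).map (fun i => (List.range 10).map (fun j =>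
    ((List.range 10).map (fun k => matGet A i k * matGet B k j)).sum))

-- the companion matrix M of Source B
def compM : List (List Int) :=
  [[0,1,0,0,0,0,0,0,0,0],
   [0,0,1,0,0,0,0,0,0,0],
   [0,0,0,1,0,0,0,0,0,0],
   [0,0,0,0,1,0,0,0,0,0],
   [0,0,0,0,0,1,0,0,0,0],
   [0,0,0,0,0,0,1,0,0,0],
   [0,0,0,0,0,0,0,1,0,0],
   [0,0,0,0,0,0,0,0,1,0],
   [0,0,0,0,0,0,0,0,0,1],
   [1,0,0,0,0,1,0,1,0,0]]

-- the identity matrix P of Source B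
def idM : List (List Int) :=
  [[1,0,0,0,0,0,0,0,0,0],
   [0,1,0,0,0,0,0,0,0,0],
   [0,0,1,0,0,0,0,0,0,0],
   [0,0,0,1,0,0,0,0,0,0],
   [0,0,0,0,1,0,0,0,0,0],
   [0,0,0,0,0,1,0,0,0,0],
   [0,0,0,0,0,0,1,0,0,0],
   [0,0,0,0,0,0,0,1,0,0],
   [0,0,0,0,0,0,0,0,1,0],
   [0,0,0,0,0,0,0,0,0,1]]

-- Source B's `while e > 0: …` squaring loop
def powLoop (e : Int) (P M : List (List Int)) : List (List Int) :=
  if 0 < e then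
    powLoop (PySem.Int.floordiv e 2)
      (if PySem.Int.mod e 2 = 1 then matMul P M else P)
      (matMul M M)
  else P
termination_by e.toNat
decreasing_by
  simp only [PySem.Int.floordiv_eq_ediv_of_pos (by omega : (0:Int) < 2)]
  omega

def find_ways_dp_alt (N : Int) : Int :=
  if N < 3 then 0
  else matGet (powLoop (N - 2) idM compM) 9 7

-- ===== PRECONDITION & SPEC =====
def Spec_find_ways_dp (N : Int) (out : Int) : Prop := out = find_ways_dp_alt N
instance (N : Int) (out : Int) : Decidable (Spec_find_ways_dp N out) := by unfold Spec_find_ways_dp; infer_instance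

-- ===== CLAIM (what is proved, stated in full; the proofs are below) =====
def Claim_equal_find_ways_dp : Prop := ∀ (N : Int), Dom_find_ways_dp N → Spec_find_ways_dp N (find_ways_dp N)

-- ===== LEMMAS AND PROOFS =====

-- the mathematical sequence: number of ordered ways to write n as a sum of 3s, 5s, 10s
def W : Nat → Int
  | 0 => 1
  | 1 => 0
  | 2 => 0
  | n + 3 => W n + (if 2 ≤ n then W (n - 2) else 0) + (if 7 ≤ n then W (n - 7) else 0)

-- W extended by 0 to negative integers
def V (n : Int) : Int := if 0 ≤ n then W n.toNat else 0

lemma Vrec (n : Int) (h : 3 ≤ n) : V n = V (n - 3) + V (n - 5) + V (n - 10) := by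
  have e : n.toNat = (n.toNat - 3) + 3 := by omega
  unfold V
  rw [if_pos (by omega : (0:Int) ≤ n), if_pos (by omega : (0:Int) ≤ n - 3), e, W]
  have e3 : (n - 3).toNat = n.toNat - 3 := by omega
  rw [e3]
  congr 1
  · congr 1
    by_cases h5 : 5 ≤ n
    · rw [if_pos (by omega), if_pos (by omega : (0:Int) ≤ n - 5)]
      congr 1; omega
    · rw [if_neg (by omega), if_neg (by omega : ¬ (0:Int) ≤ n - 5)]
  · by_cases h10 : 10 ≤ n
    · rw [if_pos (by omega), if_pos (by omega : (0:Int) ≤ n - 10)]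
      congr 1; omega
    · rw [if_neg (by omega), if_neg (by omega : ¬ (0:Int) ≤ n - 10)]

-- the window (V (n-9), …, V n) of ten consecutive values
def vecV (n : Int) : Fin 10 → Int := fun i => V (n - 9 + i)

-- specification companion matrix
def Mspec : Matrix (Fin 10) (Fin 10) Int :=
  Matrix.of fun i j =>
    if i.val = 9 then (if j.val = 0 ∨ j.val = 5 ∨ j.val = 7 then 1 else 0)
    else (if j.val = i.val + 1 then 1 else 0)

lemma step_vecV (n : Int) (h : 2 ≤ n) : Mspec.mulVec (vecV n) = vecV (n + 1) := by
  funext i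
  simp only [Matrix.mulVec, dotProduct]
  fin_cases i
  case _ => simp [Fin.sum_univ_succ, Mspec, vecV]; congr 1; omega
  case _ => simp [Fin.sum_univ_succ, Mspec, vecV]; congr 1; omega
  case _ => simp [Fin.sum_univ_succ, Mspec, vecV]; congr 1; omega
  case _ => simp [Fin.sum_univ_succ, Mspec, vecV]; congr 1; omega
  case _ => simp [Fin.sum_univ_succ, Mspec, vecV]; congr 1; omega
  case _ => simp [Fin.sum_univ_succ, Mspec, vecV]; congr 1; omega
  case _ => simp [Fin.sum_univ_succ, Mspec, vecV]; congr 1; omega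
  case _ => simp [Fin.sum_univ_succ, Mspec, vecV]; congr 1; omega
  case _ => simp [Fin.sum_univ_succ, Mspec, vecV]; congr 1; omega
  case _ =>
    simp [Fin.sum_univ_succ, Mspec, vecV]
    rw [Vrec (n+1) (by omega)]
    rw [show n + 1 - 3 = n - 9 + 7 by ring, show n + 1 - 5 = n - 9 + 5 by ring,
        show n + 1 - 10 = n - 9 by ring]
    ring

lemma pow_vecV (k : Nat) : (Mspec ^ k).mulVec (vecV 2) = vecV (2 + k) := by
  induction k with
  | zero => simp [Matrix.one_mulVec]
  | succ k ih =>
    have e : ((2 : Int) + ((k + 1 : Nat) : Int)) = 2 + (k : Int) + 1 := by push_cast; ring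
    rw [e, pow_succ', ← Matrix.mulVec_mulVec, ih, step_vecV (2 + k) (by omega)]

-- ---- A side ----
-- list-level image of `aStep`, used to reason about the array the port threads
def aStepL (ways : List Int) (n : Int) : List Int :=
  let w1 := if n - 3 ≥ 0 then ways.set n.toNat (ways.getD n.toNat 0 + ways.getD (n - 3).toNat 0) else ways
  let w2 := if n - 5 ≥ 0 then w1.set n.toNat (w1.getD n.toNat 0 + w1.getD (n - 5).toNat 0) else w1
  let w3 := if n - 10 ≥ 0 then w2.set n.toNat (w2.getD n.toNat 0 + w2.getD (n - 10).toNat 0) else w2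
  w3

lemma arrGetD (a : Array Int) (i : Nat) : a.getD i 0 = a.toList.getD i 0 := by
  simp only [Array.getD, List.getD_eq_getElem?_getD, Array.getElem?_toList]
  split_ifs with hlt
  · rw [getElem?_pos a i hlt]
    rfl
  · rw [getElem?_neg a i hlt]
    rfl

lemma toList_aStep (a : Array Int) (n : Int) : (aStep a n).toList = aStepL a.toList n := by
  simp only [aStep, aStepL]
  split_ifs <;> simp only [Array.toList_setIfInBounds, arrGetD]

lemma foldl_toList (l : List Int) (init : Array Int) :
    (l.foldl aStep init).toList = l.foldl aStepL init.toList := by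
  induction l generalizing init with
  | nil => rfl
  | cons x xs ih =>
    simp only [List.foldl_cons]
    rw [ih, toList_aStep]

lemma getD_set' (l : List Int) (i j : Nat) (v : Int) :
    (l.set i v).getD j 0 = if i = j ∧ i < l.length then v else l.getD j 0 := by
  simp only [List.getD_eq_getElem?_getD, List.getElem?_set]
  split_ifs with h1 h2 h3 h4 <;> simp_all <;> omega

def stInv (N m : Int) (l : List Int) : Prop :=
  l.length = (N + 1).toNat ∧
  ∀ i : Nat, i < (N + 1).toNat → l.getD i 0 = if (i : Int) ≤ m then V i else 0

def ways0 (N : Int) : List Int :=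
  (((List.replicate (N + 1).toNat 0).set 0 1).set 1 0).set 2 0

lemma stInv_init (N : Int) (h : 3 ≤ N) : stInv N 2 (ways0 N) := by
  constructor
  · simp [ways0]
  · intro i hi
    unfold ways0
    rw [getD_set', getD_set', getD_set']
    simp only [List.length_set, List.length_replicate]
    rcases (show i = 0 ∨ i = 1 ∨ i = 2 ∨ 3 ≤ i from by omega) with h0 | h0 | h0 | h0
    · subst h0
      rw [if_neg (by omega), if_neg (by omega), if_pos ⟨rfl, by omega⟩, if_pos (by omega)]
      simp [V, W]
    · subst h0
      rw [if_neg (by omega), if_pos ⟨rfl, by omega⟩, if_pos (by omega)]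
      simp [V, W]
    · subst h0
      rw [if_pos ⟨rfl, by omega⟩, if_pos (by omega)]
      simp [V, W]
    · rw [if_neg (by omega), if_neg (by omega), if_neg (by omega), if_neg (by omega)]
      simp

lemma stInv_set (N n : Int) (l : List Int) (h3 : 3 ≤ n) (hN : n ≤ N)
    (hlen : l.length = (N + 1).toNat)
    (hval : ∀ i : Nat, i < (N + 1).toNat → l.getD i 0 = if (i : Int) ≤ n - 1 then V i else 0)
    (v : Int) (hv : v = V n) : stInv N n (l.set n.toNat v) := by
  constructor
  · simp [hlen]
  · intro i hi
    rw [getD_set']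
    by_cases hin : n.toNat = i
    · rw [if_pos ⟨hin, by omega⟩, if_pos (by omega), hv]
      congr 1
      omega
    · rw [if_neg (by intro hc; exact hin hc.1), hval i hi]
      by_cases hle : (i : Int) ≤ n - 1
      · rw [if_pos hle, if_pos (by omega)]
      · rw [if_neg hle, if_neg (by omega)]

lemma stInv_step (N n : Int) (l : List Int) (h3 : 3 ≤ n) (hN : n ≤ N)
    (hI : stInv N (n - 1) l) : stInv N n (aStepL l n) := by
  obtain ⟨hlen, hval⟩ := hI
  have hnL : n.toNat < (N + 1).toNat := by omega
  have e1 : l.getD n.toNat 0 = 0 := by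
    rw [hval _ hnL, if_neg (by omega)]
  have e2 : l.getD (n - 3).toNat 0 = V (n - 3) := by
    rw [hval _ (by omega), if_pos (by omega)]
    congr 1
    omega
  simp only [aStepL]
  rw [if_pos (by omega : n - 3 ≥ 0)]
  have w1get : ∀ j : Nat, (l.set n.toNat (l.getD n.toNat 0 + l.getD (n - 3).toNat 0)).getD j 0
      = if n.toNat = j then V (n - 3) else l.getD j 0 := by
    intro j
    rw [getD_set']
    by_cases hj : n.toNat = j
    · rw [if_pos ⟨hj, by omega⟩, if_pos hj, e1, e2, zero_add]
    · rw [if_neg (by intro hc; exact hj hc.1), if_neg hj]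
  by_cases h5 : n - 5 ≥ 0
  · rw [if_pos h5]
    have e5 : (l.set n.toNat (l.getD n.toNat 0 + l.getD (n - 3).toNat 0)).getD (n - 5).toNat 0 = V (n - 5) := by
      rw [w1get, if_neg (by omega), hval _ (by omega), if_pos (by omega)]
      congr 1
      omega
    by_cases h10 : n - 10 ≥ 0
    · rw [if_pos h10, e5, w1get n.toNat, if_pos rfl]
      have em : ((l.set n.toNat (l.getD n.toNat 0 + l.getD (n - 3).toNat 0)).set n.toNat
          (V (n - 3) + V (n - 5))).getD n.toNat 0 = V (n - 3) + V (n - 5) := by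
        rw [getD_set', if_pos ⟨rfl, by simp [hlen]; omega⟩]
      have e10 : ((l.set n.toNat (l.getD n.toNat 0 + l.getD (n - 3).toNat 0)).set n.toNat
          (V (n - 3) + V (n - 5))).getD (n - 10).toNat 0 = V (n - 10) := by
        rw [getD_set', if_neg (by intro hc; omega), w1get, if_neg (by omega),
            hval _ (by omega), if_pos (by omega)]
        congr 1
        omega
      rw [em, e10, List.set_set, List.set_set]
      exact stInv_set N n l h3 hN hlen hval _ (Vrec n (by omega)).symm
    · rw [if_neg h10, e5, w1get n.toNat, if_pos rfl, List.set_set]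
      refine stInv_set N n l h3 hN hlen hval _ ?_
      have a10 : V (n - 10) = 0 := by unfold V; rw [if_neg (by omega)]
      rw [Vrec n (by omega), a10, add_zero]
  · rw [if_neg h5, if_neg (by omega : ¬ n - 10 ≥ 0), e1, e2, zero_add]
    refine stInv_set N n l h3 hN hlen hval _ ?_
    have a5 : V (n - 5) = 0 := by unfold V; rw [if_neg (by omega)]
    have a10 : V (n - 10) = 0 := by unfold V; rw [if_neg (by omega)]
    rw [Vrec n (by omega), a5, a10, add_zero, add_zero]

lemma fold_inv (N : Int) (h : 3 ≤ N) (k : Nat) (hk : 2 + (k : Int) ≤ N) :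
    stInv N (2 + k) ((PySem.List.pyRange 3 (2 + (k : Int) + 1) 1).foldl aStepL (ways0 N)) := by
  induction k with
  | zero =>
    rw [show (2:Int) + (0:Nat) + 1 = 3 by norm_num, PySem.List.pyRange_one_eq_nil (by omega)]
    simpa using stInv_init N h
  | succ k ih =>
    have hsp : (2 + ((k+1 : Nat) : Int) + 1) = (2 + (k : Int) + 1) + 1 := by push_cast; ring
    rw [hsp, PySem.List.pyRange_one_succ_right (by omega), List.foldl_append]
    simp only [List.foldl_cons, List.foldl_nil]
    have hstep := stInv_step N (2 + (k : Int) + 1) _ (by omega) (by push_cast at hk ⊢; omega)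
      (by simpa using ih (by push_cast at hk ⊢; omega))
    have e : (2 : Int) + ((k + 1 : Nat) : Int) = 2 + (k : Int) + 1 := by push_cast; ring
    rw [e]
    simpa using hstep

lemma A_eq_V (N : Int) (h : 3 ≤ N) : find_ways_dp N = V N := by
  have hinv := fold_inv N h (N - 2).toNat (by omega)
  have e : (2 + (((N - 2).toNat : Nat) : Int) + 1) = N + 1 := by omega
  rw [e] at hinv
  obtain ⟨hlen, hval⟩ := hinv
  unfold find_ways_dp
  rw [if_neg (by omega : ¬ N < 3)]
  show ((PySem.List.pyRange 3 (N + 1) 1).foldl aStep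
      ((((Array.replicate (N + 1).toNat 0).setIfInBounds 0 1).setIfInBounds 1
        0).setIfInBounds 2 0)).getD N.toNat 0 = V N
  rw [arrGetD, foldl_toList]
  have e0 : ((((Array.replicate (N + 1).toNat 0).setIfInBounds 0 1).setIfInBounds 1
      0).setIfInBounds 2 0).toList = ways0 N := by
    simp [ways0, Array.toList_setIfInBounds, Array.toList_replicate]
  rw [e0, hval N.toNat (by omega), if_pos (by omega)]
  congr 1
  omega

-- ---- B side ----
def toMat (A : List (List Int)) : Matrix (Fin 10) (Fin 10) Int :=
  Matrix.of fun i j => matGet A i.val j.val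

lemma toMat_mul (A B : List (List Int)) : toMat (matMul A B) = toMat A * toMat B := by
  ext i j
  simp only [toMat, Matrix.of_apply, Matrix.mul_apply]
  show matGet (matMul A B) i.val j.val = _
  unfold matGet matMul
  rw [PySem.List.getD_map_range _ 10 i.val [] i.isLt,
      PySem.List.getD_map_range _ 10 j.val 0 j.isLt]
  rw [show List.range 10 = [0,1,2,3,4,5,6,7,8,9] from rfl]
  simp [Fin.sum_univ_succ, matGet]

lemma toMat_id : toMat idM = 1 := by
  ext i j
  fin_cases i <;> fin_cases j <;> simp [toMat, idM, matGet]

lemma toMat_comp : toMat compM = Mspec := by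
  ext i j
  fin_cases i <;> fin_cases j <;> rfl

lemma powLoop_spec (e : Int) (P M : List (List Int)) :
    toMat (powLoop e P M) = toMat P * (toMat M) ^ e.toNat := by
  induction e, P, M using powLoop.induct with
  | case1 e P M hpos ih =>
    have hfd : PySem.Int.floordiv e 2 = e / 2 := PySem.Int.floordiv_eq_ediv_of_pos (by omega)
    have hmd : PySem.Int.mod e 2 = e % 2 := PySem.Int.mod_eq_emod_of_pos (by omega)
    have h2 : (e / 2).toNat = e.toNat / 2 := by omega
    rw [powLoop, if_pos hpos]
    by_cases hodd : PySem.Int.mod e 2 = 1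
    · rw [dif_pos hodd] at ih
      have hr : e % 2 = 1 := by rw [hmd] at hodd; exact hodd
      rw [if_pos hodd, ih, toMat_mul, toMat_mul, hfd, h2]
      have ht : e.toNat = 2 * (e.toNat / 2) + 1 := by omega
      conv_rhs => rw [ht]
      rw [pow_succ', pow_mul, sq, mul_assoc]
    · rw [dif_neg hodd] at ih
      have hr : e % 2 ≠ 1 := by rw [hmd] at hodd; exact hodd
      rw [if_neg hodd, ih, toMat_mul, hfd, h2]
      have ht : e.toNat = 2 * (e.toNat / 2) := by omega
      conv_rhs => rw [ht]
      rw [pow_mul, sq]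
  | case2 e P M hpos =>
    rw [powLoop, if_neg hpos]
    have : e.toNat = 0 := by omega
    rw [this, pow_zero, mul_one]

lemma B_eq_V (N : Int) (h : 3 ≤ N) : find_ways_dp_alt N = V N := by
  unfold find_ways_dp_alt
  rw [if_neg (by omega)]
  have h97 : matGet (powLoop (N - 2) idM compM) 9 7
      = toMat (powLoop (N - 2) idM compM) ⟨9, by omega⟩ ⟨7, by omega⟩ := rfl
  rw [h97, powLoop_spec, toMat_id, toMat_comp, one_mul]
  have hv := pow_vecV (N - 2).toNat
  have e2 : (2 : Int) + (((N - 2).toNat : Nat) : Int) = N := by omega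
  rw [e2] at hv
  have h9 : vecV N ⟨9, by omega⟩ = V N := by
    show V (N - 9 + ((9 : Nat) : Int)) = V N
    congr 1
    omega
  rw [← h9, ← hv]
  simp [Matrix.mulVec, dotProduct, Fin.sum_univ_succ, vecV, V, W]

-- ===== VERDICT (by name: the statement is the Claim_ definition above) =====
theorem find_ways_dp_spec : Claim_equal_find_ways_dp := by
  intro N _
  unfold Spec_find_ways_dp
  by_cases h : N < 3
  · simp [find_ways_dp, find_ways_dp_alt, h]
  · rw [A_eq_V N (by omega), B_eq_V N (by omega)]
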